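-- pv_equiv track=rewrite | github.com/jemg2030/Retos-Python-CheckIO | ESCHER/TheTower.py | check
-- ===== SOURCE A (Python) =====
-- from itertools import combinations, permutations
--
-- def check(cube):
--     common = set(cube[0])
--     for i in range(1, len(cube)):
--         common = common & set(cube[i])
--     if len(common) < 4:
--         return False
--
--     for i in combinations(common, 4):
--         for (c1, c2, c3, c4) in permutations(i, 4):
--             relationship = None
--             if (set([cube[0].index(c1), cube[0].index(c2)]) in ({0, 3}, {1, 2}, {4, 5}) and
--                     set([cube[0].index(c3), cube[0].index(c4)]) in ({0, 3}, {1, 2}, {4, 5})):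
--                 relationship = [(c1, c2), (c3, c4)]
--                 break
--         if not relationship:
--             continue
--         else:
--             if all(set([j.index(c1), j.index(c2)]) in ({0, 3}, {1, 2}, {4, 5}) and
--                    set([j.index(c3), j.index(c4)]) in ({0, 3}, {1, 2}, {4, 5}) for j in cube[1:]):
--                 return True
--
--     return False
-- ===== SOURCE B (Python) =====
-- from itertools import combinations
--
-- def check(cube):
--     common = set(cube[0])
--     for faces in cube[1:]:
--         common &= set(faces)
--     if len(common) < 4:
--         return False
--     opposite = ({0, 3}, {1, 2}, {4, 5})
--
--     def opp_pairs(faces):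
--         return {(a, b) for a in common for b in common
--                 if a < b and {faces.index(a), faces.index(b)} in opposite}
--
--     surviving = opp_pairs(cube[0])
--     for faces in cube[1:]:
--         surviving &= opp_pairs(faces)
--     return any(set(p).isdisjoint(q) for p in surviving for q in surviving)
-- ===== Notes on version B (the rewrite author's own statement) =====
-- stated objective: simpler
-- what changed: Instead of scanning all 4-combinations and all 24 permutations of common symbols with a break-and-recheck loop, B builds each cube's set of opposite-face pairs over the common symbols once, intersects these pair-sets across all cubes, and returns True iff two disjoint pairs survive.
import Mathlib
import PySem

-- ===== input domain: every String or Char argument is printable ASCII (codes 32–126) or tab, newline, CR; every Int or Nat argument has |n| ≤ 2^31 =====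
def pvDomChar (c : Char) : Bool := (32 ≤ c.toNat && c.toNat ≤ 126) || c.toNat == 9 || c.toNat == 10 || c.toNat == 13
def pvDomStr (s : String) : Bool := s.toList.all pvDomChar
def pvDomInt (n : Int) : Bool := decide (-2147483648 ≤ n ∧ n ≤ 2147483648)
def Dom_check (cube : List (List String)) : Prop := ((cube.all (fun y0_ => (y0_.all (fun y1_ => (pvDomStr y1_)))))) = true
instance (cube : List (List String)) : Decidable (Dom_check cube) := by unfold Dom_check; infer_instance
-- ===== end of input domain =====

-- B replaces A's scan of all 4-combinations and 24 permutations (with a break-and-recheck loop)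
-- by intersecting each cube's set of opposite-face pairs over the common symbols; simpler, same answers.


-- ===== PORT A =====
-- `faces.index(c)` (both Pythons only call it on members of `common`, so it never raises)
def idxD (faces : List String) (c : String) : Nat := (PySem.List.index? faces c).getD 0
-- `set([i, j]) in ({0, 3}, {1, 2}, {4, 5})` on two first-occurrence indices (both Pythons contain this test verbatim)
def oppB (i j : Nat) : Bool :=
  decide ((i = 0 ∧ j = 3) ∨ (i = 3 ∧ j = 0) ∨ (i = 1 ∧ j = 2) ∨ (i = 2 ∧ j = 1) ∨ (i = 4 ∧ j = 5) ∨ (i = 5 ∧ j = 4))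
-- the two-pair opposite test A applies to cube[0] and to every j in cube[1:]
def ok4 (faces : List String) (c1 c2 c3 c4 : String) : Bool :=
  oppB (idxD faces c1) (idxD faces c2) && oppB (idxD faces c3) (idxD faces c4)
-- the permutation test guarding the break (relationship := the first hit)
def cond0 (c0 : List String) (p : List String) : Bool :=
  match p with
  | [c1, c2, c3, c4] => ok4 c0 c1 c2 c3 c4
  | _ => false
-- `all(... for j in cube[1:])` applied to the found (c1, c2, c3, c4)
def condRest (rest : List (List String)) (p : List String) : Bool :=
  match p with
  | [c1, c2, c3, c4] => rest.all (fun j => ok4 j c1 c2 c3 c4)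
  | _ => false

def check (cube : List (List String)) : Bool :=
  let c0 := (PySem.List.pyGet? cube 0).getD []      -- cube[0]; the IndexError input [] is outside Pre_check
  let rest := cube.drop 1                            -- cube[1:] (= the cubes of range(1, len(cube)))
  let common := rest.foldl (fun acc f => PySem.Set.inter acc (PySem.Set.ofList f)) (PySem.Set.ofList c0)
  if common.length < 4 then false
  else
    (List.sublistsLen 4 common).any (fun i =>        -- for i in combinations(common, 4)
      match i.permutations.find? (cond0 c0) with     -- permutations loop, break at the first relationship
      | none => false                                -- relationship is None: continue
      | some p => condRest rest p)                   -- else: check cube[1:], return True on success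

-- ===== PORT B =====
-- set(p).isdisjoint(q) for two symbol pairs
def pairDisjoint (p q : String × String) : Bool :=
  p.1 != q.1 && p.1 != q.2 && p.2 != q.1 && p.2 != q.2
-- {(a, b) for a in common for b in common if a < b and {faces.index(a), faces.index(b)} in opposite}
def oppPairs (common : PySem.Set String) (faces : List String) : PySem.Set (String × String) :=
  PySem.Set.ofList (common.flatMap (fun a => common.filterMap (fun b =>
    if decide (a < b) && oppB (idxD faces a) (idxD faces b) then some (a, b) else none)))

def check_alt (cube : List (List String)) : Bool :=
  let c0 := (PySem.List.pyGet? cube 0).getD []      -- cube[0]; the IndexError input [] is outside Pre_check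
  let rest := cube.drop 1                            -- cube[1:]
  let common := rest.foldl (fun acc f => PySem.Set.inter acc (PySem.Set.ofList f)) (PySem.Set.ofList c0)
  if common.length < 4 then false
  else
    let surviving := rest.foldl (fun acc f => PySem.Set.inter acc (oppPairs common f)) (oppPairs common c0)
    surviving.any (fun p => surviving.any (fun q => pairDisjoint p q))

-- ===== PRECONDITION & SPEC =====
-- Pre_check excludes only the empty list, on which A raises IndexError at cube[0] (B raises there too).
def Pre_check (cube : List (List String)) : Prop := cube ≠ []
instance (cube : List (List String)) : Decidable (Pre_check cube) := by unfold Pre_check; infer_instance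
def pvWitness_check : List (List String) := [["a", "b", "c", "d", "e", "f"]]
def Spec_check (cube : List (List String)) (out : Bool) : Prop := out = check_alt cube
instance (cube : List (List String)) (out : Bool) : Decidable (Spec_check cube out) := by unfold Spec_check; infer_instance

-- ===== CLAIM (what is proved, stated in full; the proofs are below) =====
def Claim_equal_check : Prop := ∀ (cube : List (List String)), Dom_check cube → Pre_check cube → Spec_check cube (check cube)

-- ===== LEMMAS AND PROOFS =====

-- the common property both characterizations reduce to: four symbols of `common`, pairwise
-- distinct, whose two pairs are opposite in cube[0] and in every cube of cube[1:]
def Good (c0 : List String) (rest : List (List String)) (common : List String) (a b c d : String) : Prop :=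
  a ∈ common ∧ b ∈ common ∧ c ∈ common ∧ d ∈ common ∧ [a, b, c, d].Nodup ∧
  ok4 c0 a b c d = true ∧ ∀ f ∈ rest, ok4 f a b c d = true

theorem nodup4_iff {α : Type} {a b c d : α} :
    ([a, b, c, d] : List α).Nodup ↔ a ≠ b ∧ a ≠ c ∧ a ≠ d ∧ b ≠ c ∧ b ≠ d ∧ c ≠ d := by
  simp [List.nodup_cons]; tauto

theorem opp_symm {i j : Nat} (h : oppB i j = true) : oppB j i = true := by
  simp only [oppB, decide_eq_true_eq] at *; omega

theorem opp_unique {i j k : Nat} (h1 : oppB i j = true) (h2 : oppB i k = true) : j = k := by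
  simp only [oppB, decide_eq_true_eq] at *; omega

theorem idxD_inj {l : List String} {x y : String} (hx : x ∈ l) (hy : y ∈ l)
    (h : idxD l x = idxD l y) : x = y := by
  rw [← PySem.List.index?_isSome_iff (v := x)] at hx
  rw [← PySem.List.index?_isSome_iff (v := y)] at hy
  obtain ⟨k, hk⟩ := Option.isSome_iff_exists.mp hx
  obtain ⟨k', hk'⟩ := Option.isSome_iff_exists.mp hy
  obtain ⟨hlt, hget, -⟩ := PySem.List.getElem_of_index?_eq_some hk
  obtain ⟨hlt', hget', -⟩ := PySem.List.getElem_of_index?_eq_some hk'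
  simp only [idxD, hk, hk', Option.getD_some] at h
  subst h; rw [← hget, ← hget']

theorem foldl_inter_mem {α β : Type} [BEq α] [LawfulBEq α] (g : β → List α) (l : List β)
    (init : List α) (x : α) :
    x ∈ l.foldl (fun acc f => PySem.Set.inter acc (g f)) init ↔ x ∈ init ∧ ∀ f ∈ l, x ∈ g f := by
  induction l generalizing init with
  | nil => simp
  | cons y ys ih =>
    simp only [List.foldl_cons, ih, PySem.Set.mem_inter, List.mem_cons]
    constructor
    · rintro ⟨⟨h1, h2⟩, h3⟩
      exact ⟨h1, fun f hf => hf.elim (fun e => e ▸ h2) (h3 f)⟩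
    · rintro ⟨h1, h2⟩
      exact ⟨⟨h1, h2 y (Or.inl rfl)⟩, fun f hf => h2 f (Or.inr hf)⟩

theorem foldl_inter_nodup {α β : Type} [BEq α] [LawfulBEq α] (g : β → List α) (l : List β)
    (init : List α) (h : init.Nodup) :
    (l.foldl (fun acc f => PySem.Set.inter acc (g f)) init).Nodup := by
  induction l generalizing init with
  | nil => exact h
  | cons y ys ih => exact ih _ (PySem.Set.nodup_inter _ _ h)

theorem mem_oppPairs {common : PySem.Set String} {faces : List String} {p : String × String} :
    p ∈ oppPairs common faces ↔
      p.1 ∈ common ∧ p.2 ∈ common ∧ p.1 < p.2 ∧ oppB (idxD faces p.1) (idxD faces p.2) = true := by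
  obtain ⟨a, b⟩ := p
  simp only [oppPairs, PySem.Set.mem_ofList, List.mem_flatMap, List.mem_filterMap]
  constructor
  · rintro ⟨x, hx, y, hy, hxy⟩
    split at hxy
    case isTrue hcond =>
      simp only [Option.some.injEq, Prod.mk.injEq] at hxy
      obtain ⟨rfl, rfl⟩ := hxy
      simp only [Bool.and_eq_true, decide_eq_true_eq] at hcond
      exact ⟨hx, hy, hcond.1, hcond.2⟩
    case isFalse => simp at hxy
  · rintro ⟨ha, hb, hlt, hopp⟩
    refine ⟨a, ha, b, hb, ?_⟩
    simp [hlt, hopp]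

theorem pairDisjoint_true {u v w z : String} (h1 : u ≠ w) (h2 : u ≠ z) (h3 : v ≠ w) (h4 : v ≠ z) :
    pairDisjoint (u, v) (w, z) = true := by
  simp [pairDisjoint, h1, h2, h3, h4]

-- B-side characterization
theorem alt_iff (c0 : List String) (rest : List (List String)) (common : PySem.Set String) :
    ((rest.foldl (fun acc f => PySem.Set.inter acc (oppPairs common f)) (oppPairs common c0)).any
        (fun p => (rest.foldl (fun acc f => PySem.Set.inter acc (oppPairs common f)) (oppPairs common c0)).any
          (fun q => pairDisjoint p q)) = true)
      ↔ ∃ a b c d, Good c0 rest common a b c d := by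
  have hmem : ∀ p : String × String,
      p ∈ rest.foldl (fun acc f => PySem.Set.inter acc (oppPairs common f)) (oppPairs common c0) ↔
      p.1 ∈ common ∧ p.2 ∈ common ∧ p.1 < p.2 ∧
        oppB (idxD c0 p.1) (idxD c0 p.2) = true ∧
        ∀ f ∈ rest, oppB (idxD f p.1) (idxD f p.2) = true := by
    intro p
    rw [foldl_inter_mem (g := fun f => oppPairs common f)]
    simp only [mem_oppPairs]
    constructor
    · rintro ⟨⟨h1, h2, h3, h4⟩, h5⟩
      exact ⟨h1, h2, h3, h4, fun f hf => ((h5 f hf).2.2.2)⟩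
    · rintro ⟨h1, h2, h3, h4, h5⟩
      exact ⟨⟨h1, h2, h3, h4⟩, fun f hf => ⟨h1, h2, h3, h5 f hf⟩⟩
  simp only [List.any_eq_true]
  constructor
  · rintro ⟨p, hp, q, hq, hpq⟩
    rw [hmem] at hp hq
    obtain ⟨pa, pb, plt, p0, pr⟩ := hp
    obtain ⟨qa, qb, qlt, q0, qr⟩ := hq
    simp only [pairDisjoint, Bool.and_eq_true, bne_iff_ne, ne_eq] at hpq
    refine ⟨p.1, p.2, q.1, q.2, pa, pb, qa, qb, ?_, ?_, ?_⟩
    · rw [nodup4_iff]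
      exact ⟨ne_of_lt plt, hpq.1.1.1, hpq.1.1.2, hpq.1.2, hpq.2, ne_of_lt qlt⟩
    · simp [ok4, p0, q0]
    · intro f hf; simp [ok4, pr f hf, qr f hf]
  · rintro ⟨a, b, c, d, ha, hb, hc, hd, hnd, h0, hr⟩
    rw [nodup4_iff] at hnd
    obtain ⟨hab, hac, had, hbc, hbd, hcd⟩ := hnd
    simp only [ok4, Bool.and_eq_true] at h0
    have hr1 : ∀ f ∈ rest, oppB (idxD f a) (idxD f b) = true := fun f hf =>
      (by simpa [ok4, Bool.and_eq_true] using hr f hf : _ ∧ _).1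
    have hr2 : ∀ f ∈ rest, oppB (idxD f c) (idxD f d) = true := fun f hf =>
      (by simpa [ok4, Bool.and_eq_true] using hr f hf : _ ∧ _).2
    rcases lt_or_gt_of_ne hab with hab' | hab' <;> rcases lt_or_gt_of_ne hcd with hcd' | hcd'
    · exact ⟨(a, b), (hmem _).mpr ⟨ha, hb, hab', h0.1, hr1⟩,
        (c, d), (hmem _).mpr ⟨hc, hd, hcd', h0.2, hr2⟩,
        pairDisjoint_true hac had hbc hbd⟩
    · exact ⟨(a, b), (hmem _).mpr ⟨ha, hb, hab', h0.1, hr1⟩,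
        (d, c), (hmem _).mpr ⟨hd, hc, hcd', opp_symm h0.2, fun f hf => opp_symm (hr2 f hf)⟩,
        pairDisjoint_true had hac hbd hbc⟩
    · exact ⟨(b, a), (hmem _).mpr ⟨hb, ha, hab', opp_symm h0.1, fun f hf => opp_symm (hr1 f hf)⟩,
        (c, d), (hmem _).mpr ⟨hc, hd, hcd', h0.2, hr2⟩,
        pairDisjoint_true hbc hbd hac had⟩
    · exact ⟨(b, a), (hmem _).mpr ⟨hb, ha, hab', opp_symm h0.1, fun f hf => opp_symm (hr1 f hf)⟩,
        (d, c), (hmem _).mpr ⟨hd, hc, hcd', opp_symm h0.2, fun f hf => opp_symm (hr2 f hf)⟩,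
        pairDisjoint_true hbd hbc had hac⟩

-- the pairing of four distinct symbols into cube[0]-opposite pairs is unique up to order
theorem pairing_unique {c0 : List String} {a b c d x1 x2 x3 x4 : String}
    (hperm : ([x1, x2, x3, x4] : List String).Perm [a, b, c, d])
    (hnd : ([a, b, c, d] : List String).Nodup)
    (hinj : ∀ u v : String, u ∈ ([a, b, c, d] : List String) → v ∈ ([a, b, c, d] : List String) →
      idxD c0 u = idxD c0 v → u = v)
    (h1 : oppB (idxD c0 a) (idxD c0 b) = true) (h2 : oppB (idxD c0 c) (idxD c0 d) = true)
    (h3 : oppB (idxD c0 x1) (idxD c0 x2) = true) (h4 : oppB (idxD c0 x3) (idxD c0 x4) = true) :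
    (((x1 = a ∧ x2 = b) ∨ (x1 = b ∧ x2 = a)) ∧ ((x3 = c ∧ x4 = d) ∨ (x3 = d ∧ x4 = c))) ∨
    (((x1 = c ∧ x2 = d) ∨ (x1 = d ∧ x2 = c)) ∧ ((x3 = a ∧ x4 = b) ∨ (x3 = b ∧ x4 = a))) := by
  have hsub : ∀ z ∈ ([x1, x2, x3, x4] : List String), z ∈ ([a, b, c, d] : List String) :=
    fun z hz => hperm.subset hz
  have hm1 : x1 ∈ ([a, b, c, d] : List String) := hsub x1 (by simp)
  have hm2 : x2 ∈ ([a, b, c, d] : List String) := hsub x2 (by simp)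
  have hm3 : x3 ∈ ([a, b, c, d] : List String) := hsub x3 (by simp)
  have hm4 : x4 ∈ ([a, b, c, d] : List String) := hsub x4 (by simp)
  have hma : a ∈ ([a, b, c, d] : List String) := by simp
  have hmb : b ∈ ([a, b, c, d] : List String) := by simp
  have hmc : c ∈ ([a, b, c, d] : List String) := by simp
  have hmd : d ∈ ([a, b, c, d] : List String) := by simp
  have hxnd : ([x1, x2, x3, x4] : List String).Nodup := (hperm.symm).nodup hnd
  rw [nodup4_iff] at hxnd
  obtain ⟨n12, n13, n14, n23, n24, n34⟩ := hxnd
  have hx1 : x1 = a ∨ x1 = b ∨ x1 = c ∨ x1 = d := by simpa using hm1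
  have hx3 : x3 = a ∨ x3 = b ∨ x3 = c ∨ x3 = d := by simpa using hm3
  rcases hx1 with rfl | rfl | rfl | rfl
  · -- x1 = a, so x2 = b
    have e2 : x2 = b := (hinj b x2 hmb hm2 (opp_unique h1 h3)).symm
    subst e2
    rcases hx3 with h | h | rfl | rfl
    · exact absurd h.symm n13
    · exact absurd h.symm n23
    · exact Or.inl ⟨Or.inl ⟨rfl, rfl⟩, Or.inl ⟨rfl, (hinj d x4 hmd hm4 (opp_unique h2 h4)).symm⟩⟩
    · exact Or.inl ⟨Or.inl ⟨rfl, rfl⟩, Or.inr ⟨rfl, (hinj c x4 hmc hm4 (opp_unique (opp_symm h2) h4)).symm⟩⟩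
  · -- x1 = b, so x2 = a
    have e2 : x2 = a := (hinj a x2 hma hm2 (opp_unique (opp_symm h1) h3)).symm
    subst e2
    rcases hx3 with h | h | rfl | rfl
    · exact absurd h.symm n23
    · exact absurd h.symm n13
    · exact Or.inl ⟨Or.inr ⟨rfl, rfl⟩, Or.inl ⟨rfl, (hinj d x4 hmd hm4 (opp_unique h2 h4)).symm⟩⟩
    · exact Or.inl ⟨Or.inr ⟨rfl, rfl⟩, Or.inr ⟨rfl, (hinj c x4 hmc hm4 (opp_unique (opp_symm h2) h4)).symm⟩⟩
  · -- x1 = c, so x2 = d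
    have e2 : x2 = d := (hinj d x2 hmd hm2 (opp_unique h2 h3)).symm
    subst e2
    rcases hx3 with rfl | rfl | h | h
    · exact Or.inr ⟨Or.inl ⟨rfl, rfl⟩, Or.inl ⟨rfl, (hinj b x4 hmb hm4 (opp_unique h1 h4)).symm⟩⟩
    · exact Or.inr ⟨Or.inl ⟨rfl, rfl⟩, Or.inr ⟨rfl, (hinj a x4 hma hm4 (opp_unique (opp_symm h1) h4)).symm⟩⟩
    · exact absurd h.symm n13
    · exact absurd h.symm n23
  · -- x1 = d, so x2 = c
    have e2 : x2 = c := (hinj c x2 hmc hm2 (opp_unique (opp_symm h2) h3)).symm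
    subst e2
    rcases hx3 with rfl | rfl | h | h
    · exact Or.inr ⟨Or.inr ⟨rfl, rfl⟩, Or.inl ⟨rfl, (hinj b x4 hmb hm4 (opp_unique h1 h4)).symm⟩⟩
    · exact Or.inr ⟨Or.inr ⟨rfl, rfl⟩, Or.inr ⟨rfl, (hinj a x4 hma hm4 (opp_unique (opp_symm h1) h4)).symm⟩⟩
    · exact absurd h.symm n23
    · exact absurd h.symm n13

theorem ok4_swap {a b c d x1 x2 x3 x4 : String} (f : List String) (h : ok4 f a b c d = true)
    (hc : (((x1 = a ∧ x2 = b) ∨ (x1 = b ∧ x2 = a)) ∧ ((x3 = c ∧ x4 = d) ∨ (x3 = d ∧ x4 = c))) ∨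
          (((x1 = c ∧ x2 = d) ∨ (x1 = d ∧ x2 = c)) ∧ ((x3 = a ∧ x4 = b) ∨ (x3 = b ∧ x4 = a)))) :
    ok4 f x1 x2 x3 x4 = true := by
  simp only [ok4, Bool.and_eq_true] at h ⊢
  obtain ⟨hh1, hh2⟩ := h
  rcases hc with ⟨h3 | h3, h4 | h4⟩ | ⟨h3 | h3, h4 | h4⟩ <;>
    obtain ⟨rfl, rfl⟩ := h3 <;> obtain ⟨rfl, rfl⟩ := h4 <;>
    exact ⟨by first | exact hh1 | exact hh2 | exact opp_symm hh1 | exact opp_symm hh2,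
           by first | exact hh1 | exact hh2 | exact opp_symm hh1 | exact opp_symm hh2⟩

-- A-side characterization
theorem check_iff (c0 : List String) (rest : List (List String)) (common : PySem.Set String)
    (hnd : common.Nodup) (hsub : ∀ x ∈ common, x ∈ c0) :
    ((List.sublistsLen 4 common).any (fun i =>
        match i.permutations.find? (cond0 c0) with
        | none => false
        | some p => condRest rest p) = true)
      ↔ ∃ a b c d, Good c0 rest common a b c d := by
  simp only [List.any_eq_true]
  constructor
  · rintro ⟨i, hi, hbody⟩
    obtain ⟨hisub, hilen⟩ := List.mem_sublistsLen.mp hi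
    cases hfind : i.permutations.find? (cond0 c0) with
    | none => rw [hfind] at hbody; simp at hbody
    | some p =>
      rw [hfind] at hbody
      have hcond := List.find?_some hfind
      have hpmem := List.mem_of_find?_eq_some hfind
      have hpperm : p.Perm i := List.mem_permutations.mp hpmem
      have hpnd : p.Nodup := hpperm.symm.nodup (hisub.nodup hnd)
      match p, hcond, hbody, hpnd, hpperm with
      | [c1, c2, c3, c4], hcond, hbody, hpnd, hpperm =>
        refine ⟨c1, c2, c3, c4, ?_, ?_, ?_, ?_, hpnd, ?_, ?_⟩
        · exact hisub.subset (hpperm.subset (by simp))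
        · exact hisub.subset (hpperm.subset (by simp))
        · exact hisub.subset (hpperm.subset (by simp))
        · exact hisub.subset (hpperm.subset (by simp))
        · simpa [cond0] using hcond
        · simpa [condRest, List.all_eq_true] using hbody
  · rintro ⟨a, b, c, d, ha, hb, hc, hd, hnd4, h0, hr⟩
    have hsubset : ([a, b, c, d] : List String) ⊆ common := by
      intro z hz
      rcases (by simpa using hz : z = a ∨ z = b ∨ z = c ∨ z = d) with rfl | rfl | rfl | rfl <;>
        assumption
    obtain ⟨s, hs_perm, hs_sub⟩ := List.Nodup.subperm hnd4 hsubset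
    have hslen : s.length = 4 := by rw [hs_perm.length_eq]; rfl
    refine ⟨s, List.mem_sublistsLen.mpr ⟨hs_sub, hslen⟩, ?_⟩
    have habcd_mem : ([a, b, c, d] : List String) ∈ s.permutations :=
      List.mem_permutations.mpr hs_perm.symm
    have h0' : cond0 c0 [a, b, c, d] = true := by simpa [cond0] using h0
    have hsome : (s.permutations.find? (cond0 c0)).isSome = true :=
      List.find?_isSome.mpr ⟨_, habcd_mem, h0'⟩
    obtain ⟨p, hfind⟩ := Option.isSome_iff_exists.mp hsome
    rw [hfind]
    have hcond := List.find?_some hfind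
    have hpperm : p.Perm [a, b, c, d] :=
      (List.mem_permutations.mp (List.mem_of_find?_eq_some hfind)).trans hs_perm
    have hinj : ∀ u v : String, u ∈ ([a, b, c, d] : List String) →
        v ∈ ([a, b, c, d] : List String) → idxD c0 u = idxD c0 v → u = v := by
      intro u v hu hv h
      exact idxD_inj (hsub u (hsubset hu)) (hsub v (hsubset hv)) h
    simp only [ok4, Bool.and_eq_true] at h0
    match p, hcond, hpperm with
    | [x1, x2, x3, x4], hcond, hpperm =>
      have hok := (by simpa [cond0, ok4, Bool.and_eq_true] using hcond : _ ∧ _)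
      have hcase := pairing_unique hpperm hnd4 hinj h0.1 h0.2 hok.1 hok.2
      simp only [condRest, List.all_eq_true]
      intro f hf
      exact ok4_swap f (hr f hf) hcase

-- ===== VERDICT (by name: the statement is the Claim_ definition above) =====
theorem core_eq (c0 : List String) (rest : List (List String)) (common : PySem.Set String)
    (hnd : common.Nodup) (hsub : ∀ x ∈ common, x ∈ c0) :
    (if common.length < 4 then false
     else (List.sublistsLen 4 common).any (fun i =>
        match i.permutations.find? (cond0 c0) with
        | none => false
        | some p => condRest rest p)) =
    (if common.length < 4 then false
     else (rest.foldl (fun acc f => PySem.Set.inter acc (oppPairs common f)) (oppPairs common c0)).any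
        (fun p => (rest.foldl (fun acc f => PySem.Set.inter acc (oppPairs common f)) (oppPairs common c0)).any
          (fun q => pairDisjoint p q))) := by
  by_cases hl : common.length < 4
  · rw [if_pos hl, if_pos hl]
  · rw [if_neg hl, if_neg hl, Bool.eq_iff_iff, check_iff c0 rest common hnd hsub,
      alt_iff c0 rest common]

theorem check_spec : Claim_equal_check := by
  intro cube _ _
  show check cube = check_alt cube
  unfold check check_alt
  exact core_eq _ _ _
    (foldl_inter_nodup (fun f => PySem.Set.ofList f) _ _ (PySem.Set.nodup_ofList _))
    (fun x hx => Iff.mp (PySem.Set.mem_ofList _ _)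
      ((foldl_inter_mem (fun f => PySem.Set.ofList f) _ _ x).mp hx).1)
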